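-- pv_equiv track=rewrite | github.com/boriskondev/first_excel_script | oli_script.py | process_code
-- ===== SOURCE A (Python) =====
-- def process_code(data, current_code):
--     symbols = ["/", "NO"]
--     data = data.strip()
--     if current_code in data[0: len(current_code)]:
--         data = data.strip().replace(current_code, "").strip()
--         for symbol in symbols:
--             if symbol in data:
--                 data = data.split(symbol)[0].strip()
--
--     return data
-- ===== SOURCE B (Python) =====
-- def process_code(data, current_code):
--     data = data.strip()
--     if data.startswith(current_code):
--         data = data.replace(current_code, "").strip()
--         cuts = [p for p in (data.find(sym) for sym in ("/", "NO")) if p != -1]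
--         if cuts:
--             data = data[:min(cuts)].strip()
--     return data
-- ===== Notes on version B (the rewrite author's own statement) =====
-- stated objective: simpler
-- what changed: Instead of A's sequential per-symbol passes (test 'in', split, take piece 0, strip, feeding each result into the next), B computes each symbol's first position with find, takes the minimum non-negative one and slices/strips once at that earliest cut point (guard expressed as startswith).
import Mathlib
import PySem

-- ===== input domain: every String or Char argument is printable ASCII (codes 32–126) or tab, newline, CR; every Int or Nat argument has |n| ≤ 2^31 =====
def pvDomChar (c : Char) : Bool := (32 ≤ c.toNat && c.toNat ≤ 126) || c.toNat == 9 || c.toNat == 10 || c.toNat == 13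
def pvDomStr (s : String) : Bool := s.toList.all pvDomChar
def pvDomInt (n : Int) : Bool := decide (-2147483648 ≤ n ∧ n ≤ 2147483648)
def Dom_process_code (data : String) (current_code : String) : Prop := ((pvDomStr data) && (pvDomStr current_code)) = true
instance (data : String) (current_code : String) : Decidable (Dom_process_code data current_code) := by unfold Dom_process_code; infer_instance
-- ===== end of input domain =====

-- B replaces A's sequential split-at-symbol passes by one earliest-cut-point (find/min) slice; objective: simpler.

-- ===== PORT A =====
def process_code (data : String) (current_code : String) : String :=
  let symbols : List String := ["/", "NO"]
  let data := PySem.Str.strip data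
  if PySem.Str.isIn current_code (PySem.Str.slice data (some 0) (some (PySem.Str.len current_code))) then
    let data := PySem.Str.strip (PySem.Str.replace (PySem.Str.strip data) current_code "")
    symbols.foldl (fun d symbol =>
      if PySem.Str.isIn symbol d then
        PySem.Str.strip (((PySem.Str.split? d symbol).getD []).headD "")
      else d) data
  else data

-- ===== PORT B =====
def process_code_alt (data : String) (current_code : String) : String :=
  let data := PySem.Str.strip data
  if PySem.Str.startswith data current_code then
    let d := PySem.Str.strip (PySem.Str.replace data current_code "")
    let cuts := ((["/", "NO"] : List String).map (fun sym => PySem.Str.find d sym)).filter (fun p => p != -1)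
    match PySem.List.min? cuts (fun p => p) with
    | some m => PySem.Str.strip (PySem.Str.slice d none (some m))
    | none => d
  else data

-- ===== PRECONDITION & SPEC =====
def Spec_process_code (data : String) (current_code : String) (out : String) : Prop := out = process_code_alt data current_code
instance (data : String) (current_code : String) (out : String) : Decidable (Spec_process_code data current_code out) := by unfold Spec_process_code; infer_instance

-- ===== CLAIM (what is proved, stated in full; the proofs are below) =====
def Claim_equal_process_code : Prop := ∀ (data : String) (current_code : String), Dom_process_code data current_code → Spec_process_code data current_code (process_code data current_code)

-- ===== LEMMAS AND PROOFS =====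

-- find.go shifts its starting index uniformly (or is -1 independently of it)
theorem pv_findgo_add (sub l : List Char) : ∀ (k : Nat),
    PySem.Chars.find.go sub l k =
      if PySem.Chars.find.go sub l 0 = -1 then -1 else PySem.Chars.find.go sub l 0 + k := by
  induction l with
  | nil =>
      intro k
      simp only [PySem.Chars.find.go]
      by_cases h : sub.isEmpty <;> simp [h]
  | cons c rest ih =>
      intro k
      simp only [PySem.Chars.find.go]
      by_cases h : sub.isPrefixOf (c :: rest)
      · simp [h]
      · simp only [h, Bool.false_eq_true, if_false]
        rw [ih (k+1), ih 1]
        by_cases h2 : PySem.Chars.find.go sub rest 0 = -1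
        · simp [h2]
        · simp only [h2, Bool.false_eq_true, if_false]
          have hge : -1 ≤ PySem.Chars.find.go sub rest 0 := by
            have := PySem.Chars.neg_one_le_find rest sub
            simpa [PySem.Chars.find] using this
          rw [if_neg (by omega)]
          push_cast
          ring

theorem pv_find_cons (sub : List Char) (c : Char) (rest : List Char)
    (h : sub.isPrefixOf (c :: rest) = false) :
    PySem.Chars.find (c :: rest) sub =
      if PySem.Chars.find rest sub = -1 then -1 else PySem.Chars.find rest sub + 1 := by
  simp only [PySem.Chars.find]
  rw [PySem.Chars.find.go]
  simp only [h, Bool.false_eq_true, if_false]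
  rw [pv_findgo_add]
  simp

-- find points at i when there is an occurrence at i and none before it
theorem pv_find_eq_of (s sub : List Char) (i : Nat)
    (h1 : sub <+: s.drop i) (h2 : ∀ j < i, ¬ sub <+: s.drop j) :
    PySem.Chars.find s sub = (i : Int) := by
  have hinf : sub <:+: s := by
    rcases h1 with ⟨t, ht⟩
    exact ⟨s.take i, t, by rw [List.append_assoc, ht, List.take_append_drop]⟩
  have hnn : 0 ≤ PySem.Chars.find s sub := (PySem.Chars.find_nonneg_iff s sub).mpr hinf
  obtain ⟨hp, hmin⟩ := PySem.Chars.find_spec hnn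
  rcases lt_trichotomy (PySem.Chars.find s sub).toNat i with h | h | h
  · exact absurd hp (h2 _ h)
  · omega
  · exact absurd h1 (hmin i h)

-- splitOn.go: once something is in the accumulator, the head of the result is its last element
theorem pv_splitgo_head_acc (sep : List Char) : ∀ (fuel : Nat) (l cur : List Char)
    (acc : List (List Char)) (x : List Char),
    (PySem.Chars.splitOn.go sep fuel l cur (acc ++ [x])).headD [] = x := by
  intro fuel
  induction fuel with
  | zero =>
      intro l cur acc x
      rw [PySem.Chars.splitOn.go]
      simp
  | succ fuel ih =>
      intro l cur acc x
      cases l with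
      | nil =>
          rw [PySem.Chars.splitOn.go]
          · simp
          · omega
      | cons c rest =>
          rw [PySem.Chars.splitOn.go]
          by_cases h : sep.isPrefixOf (c :: rest)
          · simp only [h, if_true]
            have := ih (List.drop sep.length (c :: rest)) [] ((cur.reverse :: acc)) x
            simpa using this
          · simp only [h, Bool.false_eq_true, if_false]
            exact ih rest (c :: cur) acc x

theorem pv_splitgo_head (sep : List Char) (hsep : sep ≠ []) : ∀ (fuel : Nat) (l cur : List Char),
    l.length < fuel → 0 ≤ PySem.Chars.find l sep →
    (PySem.Chars.splitOn.go sep fuel l cur []).headD []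
      = cur.reverse ++ l.take (PySem.Chars.find l sep).toNat := by
  intro fuel
  induction fuel with
  | zero => intro l cur hlt; omega
  | succ fuel ih =>
      intro l cur hlt hf
      cases l with
      | nil =>
          exfalso
          have : PySem.Chars.find ([] : List Char) sep = -1 := by
            simp only [PySem.Chars.find]
            rw [PySem.Chars.find.go]
            simp [List.isEmpty_iff, hsep]
          omega
      | cons c rest =>
          rw [PySem.Chars.splitOn.go]
          by_cases h : sep.isPrefixOf (c :: rest)
          · simp only [h, if_true]
            have hf0 : PySem.Chars.find (c :: rest) sep = 0 := by
              simp only [PySem.Chars.find]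
              rw [PySem.Chars.find.go]
              simp [h]
            rw [hf0]
            have := pv_splitgo_head_acc sep fuel (List.drop sep.length (c :: rest)) [] [] cur.reverse
            simpa using this
          · simp only [h, Bool.false_eq_true, if_false]
            have hcons := pv_find_cons sep c rest (by
              revert h; cases sep.isPrefixOf (c :: rest) <;> simp)
            have hrest : PySem.Chars.find rest sep ≠ -1 := by
              intro hneg
              rw [hcons, if_pos hneg] at hf
              omega
            have hrest0 : 0 ≤ PySem.Chars.find rest sep := by
              have := PySem.Chars.neg_one_le_find rest sep
              omega
            have := ih rest (c :: cur) (by simpa using Nat.lt_of_succ_lt_succ hlt) hrest0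
            rw [this, hcons, if_neg hrest]
            have : (PySem.Chars.find rest sep + 1).toNat = (PySem.Chars.find rest sep).toNat + 1 := by
              omega
            simp [this]

theorem pv_split_head (s sep : List Char) (hsep : sep ≠ [])
    (h : 0 ≤ PySem.Chars.find s sep) :
    (PySem.Chars.splitOn s sep).headD [] = s.take (PySem.Chars.find s sep).toNat := by
  have := pv_splitgo_head sep hsep (s.length + 1) s [] (by omega) h
  simpa [PySem.Chars.splitOn] using this

theorem pv_splitgo_nonempty (sep : List Char) : ∀ (fuel : Nat) (l cur : List Char)
    (acc : List (List Char)), PySem.Chars.splitOn.go sep fuel l cur acc ≠ [] := by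
  intro fuel
  induction fuel with
  | zero => intro l cur acc; rw [PySem.Chars.splitOn.go]; simp
  | succ fuel ih =>
      intro l cur acc
      cases l with
      | nil =>
          rw [PySem.Chars.splitOn.go]
          · simp
          · omega
      | cons c rest =>
          rw [PySem.Chars.splitOn.go]
          by_cases h : sep.isPrefixOf (c :: rest)
          · simp only [h, if_true]; exact ih _ _ _
          · simp only [h, Bool.false_eq_true, if_false]; exact ih _ _ _

theorem pv_splitOn_nonempty (s sep : List Char) : PySem.Chars.splitOn s sep ≠ [] :=
  pv_splitgo_nonempty sep (s.length + 1) s [] []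

theorem pv_dropWhile_idem (p : Char → Bool) (l : List Char) :
    List.dropWhile p (List.dropWhile p l) = List.dropWhile p l := by
  induction l with
  | nil => simp
  | cons c rest ih =>
      by_cases h : p c
      · simp [List.dropWhile_cons, h, ih]
      · simp [List.dropWhile_cons, h]

-- rstrip is a prefix, the removed tail is all whitespace
theorem pv_rstrip_decomp (y : List Char) :
    ∃ w, y = PySem.Chars.rstrip y ++ w ∧ ∀ c ∈ w, PySem.Chars.isspace c := by
  refine ⟨(List.takeWhile PySem.Chars.isspace y.reverse).reverse, ?_, ?_⟩
  · unfold PySem.Chars.rstrip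
    rw [← List.reverse_append, List.takeWhile_append_dropWhile, List.reverse_reverse]
  · intro c hc
    exact List.mem_takeWhile_imp (List.mem_reverse.mp hc)

-- a prefix of a left-stripped list is left-stripped
theorem pv_lstrip_prefix (d e : List Char) (hd : PySem.Chars.lstrip d = d)
    (he : e <+: d) : PySem.Chars.lstrip e = e := by
  unfold PySem.Chars.lstrip at hd ⊢
  rw [List.dropWhile_eq_self_iff] at hd ⊢
  intro hl
  have hlen : 0 < d.length := lt_of_lt_of_le hl he.length_le
  have hg : e[0]'hl = d[0]'hlen := he.getElem hl
  rw [hg]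
  exact hd hlen

theorem pv_lstrip_strip (x : List Char) :
    PySem.Chars.lstrip (PySem.Chars.strip x) = PySem.Chars.strip x := by
  obtain ⟨w, hdec, -⟩ := pv_rstrip_decomp (PySem.Chars.lstrip x)
  have hfix : PySem.Chars.lstrip (PySem.Chars.lstrip x) = PySem.Chars.lstrip x := by
    unfold PySem.Chars.lstrip
    exact pv_dropWhile_idem _ x
  have : PySem.Chars.strip x = PySem.Chars.rstrip (PySem.Chars.lstrip x) := rfl
  rw [this]
  exact pv_lstrip_prefix (PySem.Chars.lstrip x) _ hfix ⟨w, hdec.symm⟩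

theorem pv_rstrip_idem (y : List Char) :
    PySem.Chars.rstrip (PySem.Chars.rstrip y) = PySem.Chars.rstrip y := by
  unfold PySem.Chars.rstrip
  rw [List.reverse_reverse, pv_dropWhile_idem]

theorem pv_strip_strip (x : List Char) :
    PySem.Chars.strip (PySem.Chars.strip x) = PySem.Chars.strip x := by
  have h1 : ∀ y, PySem.Chars.strip y = PySem.Chars.rstrip (PySem.Chars.lstrip y) :=
    fun _ => rfl
  rw [h1 (PySem.Chars.strip x), pv_lstrip_strip, h1 x, pv_rstrip_idem]

theorem pv_lstrip_take (d : List Char) (n : Nat) (hd : PySem.Chars.lstrip d = d) :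
    PySem.Chars.lstrip (d.take n) = d.take n :=
  pv_lstrip_prefix d _ hd (List.take_prefix n d)

theorem pv_strip_infix (y : List Char) : PySem.Chars.strip y <:+: y := by
  unfold PySem.Chars.strip
  obtain ⟨w, hdec, -⟩ := pv_rstrip_decomp (PySem.Chars.lstrip y)
  have h1 : PySem.Chars.rstrip (PySem.Chars.lstrip y) <+: PySem.Chars.lstrip y := ⟨w, hdec.symm⟩
  have h2 : PySem.Chars.lstrip y <:+ y := List.dropWhile_suffix _
  exact h1.isInfix.trans h2.isInfix

-- strip of a prefix of a left-stripped list is a shorter prefix plus trailing whitespace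
theorem pv_strip_take_decomp (D : List Char) (n : Nat) (hD : PySem.Chars.lstrip D = D) :
    ∃ b w, PySem.Chars.strip (D.take n) = D.take b ∧ b ≤ n ∧
      D.take n = D.take b ++ w ∧ ∀ c ∈ w, PySem.Chars.isspace c := by
  have hfix : PySem.Chars.strip (D.take n) = PySem.Chars.rstrip (D.take n) := by
    rw [PySem.Chars.strip, pv_lstrip_take D n hD]
  obtain ⟨w, hdec, hws⟩ := pv_rstrip_decomp (D.take n)
  set e := PySem.Chars.rstrip (D.take n) with he
  have hepre : e <+: D :=
    List.IsPrefix.trans ⟨w, hdec.symm⟩ (List.take_prefix n D)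
  have heq : e = D.take e.length := List.prefix_iff_eq_take.mp hepre
  have hble : e.length ≤ n := by
    have : e.length ≤ (D.take n).length := by
      rw [hdec]; simp
    have := List.length_take_le n D
    omega
  exact ⟨e.length, w, hfix.trans heq, hble, by rw [← heq, ← hdec], hws⟩

-- the guard: "cc in data[0:len(cc)]" is startswith
theorem pv_guard (s cc : String) :
    PySem.Str.isIn cc (PySem.Str.slice s (some 0) (some (PySem.Str.len cc)))
      = PySem.Str.startswith s cc := by
  rw [PySem.Str.isIn_eq, PySem.Str.toList_slice, PySem.Str.len_eq, PySem.Str.startswith_eq]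
  rw [PySem.Chars.slice_eq_listSlice]
  rw [PySem.List.slice_toNat _ (le_refl (0:Int)) (by positivity)]
  simp only [Int.toNat_zero, Int.toNat_natCast, List.drop_zero, Nat.sub_zero]
  rw [Bool.eq_iff_iff, PySem.Chars.isIn_iff_infix, PySem.Chars.startswith_iff]
  constructor
  · intro h
    have hsub := h.sublist
    have hlen : (List.take cc.toList.length s.toList).length ≤ cc.toList.length := by simp
    have heq : cc.toList = List.take cc.toList.length s.toList :=
      hsub.eq_of_length_le hlen
    rw [heq]
    exact List.take_prefix _ _
  · intro h
    rw [← List.prefix_iff_eq_take.mp h]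

-- the head of Python's d.split(sym) as a String, when sym occurs in d
theorem pv_Astep_toList (d sym : String) (h0 : sym.toList ≠ [])
    (hf : 0 ≤ PySem.Chars.find d.toList sym.toList) :
    (PySem.Str.strip (((PySem.Str.split? d sym).getD []).headD "")).toList
      = PySem.Chars.strip (d.toList.take (PySem.Chars.find d.toList sym.toList).toNat) := by
  rw [PySem.Str.toList_strip]
  congr 1
  have hsplit : PySem.Chars.split? d.toList sym.toList
      = some (PySem.Chars.splitOn d.toList sym.toList) := by
    unfold PySem.Chars.split?
    simp [List.isEmpty_iff, h0]
  rw [PySem.Str.split?, hsplit]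
  simp only [Option.map_some, Option.getD_some]
  cases hso : PySem.Chars.splitOn d.toList sym.toList with
  | nil => exact absurd hso (pv_splitOn_nonempty _ _)
  | cons a t =>
      have := pv_split_head d.toList sym.toList h0 hf
      rw [hso] at this
      simp only [List.headD_cons] at this
      simp [this]

-- the core: on a left-stripped string d, A's two sequential symbol passes
-- equal B's single cut at the minimum find position
theorem pv_core (d : String) (hd : PySem.Chars.lstrip d.toList = d.toList) :
    (["/", "NO"] : List String).foldl (fun d' symbol =>
        if PySem.Str.isIn symbol d' then
          PySem.Str.strip (((PySem.Str.split? d' symbol).getD []).headD "")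
        else d') d
      = (match PySem.List.min? (((["/", "NO"] : List String).map
            (fun sym => PySem.Str.find d sym)).filter (fun p => p != -1)) (fun p => p) with
        | some m => PySem.Str.strip (PySem.Str.slice d none (some m))
        | none => d) := by
  have hslash : ("/" : String).toList = ['/'] := rfl
  have hNO : ("NO" : String).toList = ['N', 'O'] := rfl
  have hfind1 : PySem.Str.find d "/" = PySem.Chars.find d.toList ['/'] := by
    rw [PySem.Str.find_eq, hslash]
  have hfind2 : PySem.Str.find d "NO" = PySem.Chars.find d.toList ['N', 'O'] := by
    rw [PySem.Str.find_eq, hNO]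
  have hisin1 : PySem.Str.isIn "/" d = (PySem.Chars.find d.toList ['/'] != -1) := by
    rw [PySem.Str.isIn_eq, hslash]; rfl
  have hisin2d : PySem.Str.isIn "NO" d = (PySem.Chars.find d.toList ['N', 'O'] != -1) := by
    rw [PySem.Str.isIn_eq, hNO]; rfl
  have hge1 := PySem.Chars.neg_one_le_find d.toList ['/']
  have hge2 := PySem.Chars.neg_one_le_find d.toList ['N', 'O']
  simp only [List.foldl_cons, List.foldl_nil, List.map_cons, List.map_nil, hfind1, hfind2,
    hisin1]
  by_cases h1 : PySem.Chars.find d.toList ['/'] = -1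
  · -- no '/' in d
    have hfil : List.filter (fun p => p != -1)
        [PySem.Chars.find d.toList ['/'], PySem.Chars.find d.toList ['N', 'O']]
        = List.filter (fun p => p != -1) [PySem.Chars.find d.toList ['N', 'O']] := by
      simp [h1]
    rw [hfil]
    simp only [h1, bne_self_eq_false, Bool.false_eq_true, if_false]
    by_cases h2 : PySem.Chars.find d.toList ['N', 'O'] = -1
    · -- neither symbol: both sides are d
      rw [hisin2d]
      simp [h2, PySem.List.min?]
    · -- only "NO": cut there on both sides
      have hf2 : 0 ≤ PySem.Chars.find d.toList ['N', 'O'] := by omega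
      rw [hisin2d]
      have hfil2 : List.filter (fun p => p != -1) [PySem.Chars.find d.toList ['N', 'O']]
          = [PySem.Chars.find d.toList ['N', 'O']] := by simp [h2]
      rw [hfil2]
      have hmin : PySem.List.min? [PySem.Chars.find d.toList ['N', 'O']] (fun p => p)
          = some (PySem.Chars.find d.toList ['N', 'O']) := by
        simp [PySem.List.min?]
      rw [hmin]
      simp only [h2, bne_iff_ne, ne_eq, not_false_eq_true, if_pos, if_true]
      apply String.toList_inj.mp
      rw [pv_Astep_toList d "NO" (by simp [hNO]) (by rw [hNO]; exact hf2)]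
      rw [PySem.Str.toList_strip, PySem.Str.toList_slice, PySem.Chars.slice_eq_listSlice,
        PySem.List.slice_to _ hf2, hNO]
  · -- '/' occurs in d
    have hf1' : 0 ≤ PySem.Chars.find d.toList ['/'] := by omega
    obtain ⟨n1, hn1⟩ : ∃ n : Nat, PySem.Chars.find d.toList ['/'] = (n : Int) :=
      ⟨_, (Int.toNat_of_nonneg hf1').symm⟩
    obtain ⟨hp1, hmin1⟩ := PySem.Chars.find_spec (s := d.toList) (sub := ['/']) hf1'
    rw [hn1] at hp1 hmin1
    simp only [Int.toNat_natCast] at hp1 hmin1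
    obtain ⟨t1, ht1⟩ := hp1
    have hn1len : n1 < d.toList.length := by
      have hlen := congrArg List.length ht1
      rw [List.length_drop, List.length_append] at hlen
      simp only [List.length_cons, List.length_nil] at hlen
      omega
    simp only [h1, bne_iff_ne, ne_eq, not_false_eq_true, if_pos, if_true]
    -- A's first pass result is strip (take n1 D) = take b D ++ trailing whitespace
    have hstep1 : (PySem.Str.strip (((PySem.Str.split? d "/").getD []).headD "")).toList
        = PySem.Chars.strip (d.toList.take n1) := by
      have := pv_Astep_toList d "/" (by simp [hslash]) (by rw [hslash]; exact hf1')
      rw [hslash, hn1] at this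
      simpa using this
    obtain ⟨b, w, he, hbn, hdec, hws⟩ := pv_strip_take_decomp d.toList n1 hd
    have hblen : b ≤ d.toList.length := by omega
    have htklen : (d.toList.take b).length = b := by
      rw [List.length_take]
      omega
    by_cases h2 : PySem.Chars.find d.toList ['N', 'O'] = -1
    · -- no "NO" in d, hence none in A's first pass result either
      have hnoNO : PySem.Str.isIn "NO"
          (PySem.Str.strip (((PySem.Str.split? d "/").getD []).headD "")) = false := by
        rw [PySem.Str.isIn_eq, hNO, hstep1]
        rw [← Bool.not_eq_true]
        intro hcon
        have hinf := (PySem.Chars.isIn_iff_infix _ _).mp hcon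
        have : (['N', 'O'] : List Char) <:+: d.toList :=
          hinf.trans ((pv_strip_infix _).trans (List.take_prefix n1 d.toList).isInfix)
        exact (PySem.Chars.find_eq_neg_one_iff _ _).mp h2 this
      rw [hnoNO]
      have hfil : List.filter (fun p => p != -1)
          [PySem.Chars.find d.toList ['/'], PySem.Chars.find d.toList ['N', 'O']]
          = [PySem.Chars.find d.toList ['/']] := by
        simp [h1, h2]
      rw [hfil]
      have hmin : PySem.List.min? [PySem.Chars.find d.toList ['/']] (fun p => p)
          = some (PySem.Chars.find d.toList ['/']) := by
        simp [PySem.List.min?]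
      rw [hmin]
      simp only [Bool.false_eq_true, if_false]
      apply String.toList_inj.mp
      rw [hstep1, PySem.Str.toList_strip, PySem.Str.toList_slice,
        PySem.Chars.slice_eq_listSlice, PySem.List.slice_to _ hf1', hn1]
      simp
    · -- both symbols occur in d
      have hf2' : 0 ≤ PySem.Chars.find d.toList ['N', 'O'] := by omega
      obtain ⟨n2, hn2⟩ : ∃ n : Nat, PySem.Chars.find d.toList ['N', 'O'] = (n : Int) :=
        ⟨_, (Int.toNat_of_nonneg hf2').symm⟩
      obtain ⟨hp2, hmin2⟩ := PySem.Chars.find_spec (s := d.toList) (sub := ['N', 'O']) hf2'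
      rw [hn2] at hp2 hmin2
      simp only [Int.toNat_natCast] at hp2 hmin2
      obtain ⟨t2, ht2⟩ := hp2
      have hdropN : d.toList.drop n2 = 'N' :: 'O' :: t2 := by rw [← ht2]; rfl
      have hdropS : d.toList.drop n1 = '/' :: t1 := by rw [← ht1]; rfl
      have hfil : List.filter (fun p => p != -1)
          [PySem.Chars.find d.toList ['/'], PySem.Chars.find d.toList ['N', 'O']]
          = [PySem.Chars.find d.toList ['/'], PySem.Chars.find d.toList ['N', 'O']] := by
        simp [h1, h2]
      rw [hfil]
      have hmin12 : PySem.List.min? [PySem.Chars.find d.toList ['/'],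
          PySem.Chars.find d.toList ['N', 'O']] (fun p => p)
          = (if PySem.Chars.find d.toList ['N', 'O'] < PySem.Chars.find d.toList ['/']
              then some (PySem.Chars.find d.toList ['N', 'O'])
              else some (PySem.Chars.find d.toList ['/'])) := by
        simp [PySem.List.min?]
      rw [hmin12]
      have hne : n1 ≠ n2 := by
        intro hcon
        rw [hcon, hdropN] at hdropS
        simp at hdropS
      rcases Nat.lt_or_ge n1 n2 with hlt | hge
      · -- '/' first: A's second pass is skipped, the minimum is find '/'
        have hord : ¬ PySem.Chars.find d.toList ['N', 'O'] < PySem.Chars.find d.toList ['/'] := by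
          rw [hn1, hn2]
          exact_mod_cast (by omega : ¬ (n2 : Int) < (n1 : Int))
        rw [if_neg hord]
        have hnoNO : PySem.Str.isIn "NO"
            (PySem.Str.strip (((PySem.Str.split? d "/").getD []).headD "")) = false := by
          rw [PySem.Str.isIn_eq, hNO, hstep1]
          rw [← Bool.not_eq_true]
          intro hcon
          obtain ⟨j, hj⟩ := (PySem.Chars.exists_prefix_drop_iff_isIn ['N', 'O']
            (PySem.Chars.strip (d.toList.take n1))).symm.mp hcon
          rw [he] at hj
          obtain ⟨t3, ht3⟩ := hj
          have hjb : j + 2 ≤ b := by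
            have hlen := congrArg List.length ht3
            rw [List.length_append, List.length_drop, htklen] at hlen
            simp only [List.length_cons, List.length_nil] at hlen
            omega
          have hocc : (['N', 'O'] : List Char) <+: d.toList.drop j := by
            refine ⟨t3 ++ d.toList.drop b, ?_⟩
            have hsplit : d.toList.drop j = (d.toList.take b).drop j ++ d.toList.drop b := by
              conv_lhs => rw [← List.take_append_drop b d.toList]
              rw [List.drop_append_of_le_length (by rw [htklen]; omega)]
            rw [hsplit, ← ht3]
            simp
          exact hmin2 j (by omega) hocc
        rw [hnoNO]
        simp only [Bool.false_eq_true, if_false]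
        apply String.toList_inj.mp
        rw [hstep1, PySem.Str.toList_strip, PySem.Str.toList_slice,
          PySem.Chars.slice_eq_listSlice, PySem.List.slice_to _ hf1', hn1]
        simp
      · -- "NO" first: A's second pass cuts at n2, the overall minimum
        have hlt2 : n2 < n1 := by omega
        have hgetO : d.toList[n2 + 1]? = some 'O' := by
          have := List.getElem?_drop (xs := d.toList) (i := n2) (j := 1)
          rw [hdropN] at this
          simpa using this.symm
        have hadj : n2 + 2 ≤ n1 := by
          rcases Nat.lt_or_ge (n2 + 1) n1 with h | h
          · omega
          · exfalso
            have hn1eq : n1 = n2 + 1 := by omega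
            have hgetS : d.toList[n1]? = some '/' := by
              have := List.getElem?_drop (xs := d.toList) (i := n1) (j := 0)
              rw [hdropS] at this
              simpa using this.symm
            rw [hn1eq, hgetO] at hgetS
            simp at hgetS
        -- the occurrence survives rstripping: n2 + 2 ≤ b
        have hb2 : n2 + 2 ≤ b := by
          by_contra hcon
          have hble : b ≤ n2 + 1 := by omega
          have h1' : (d.toList.take n1)[n2 + 1]? = some 'O' := by
            rw [List.getElem?_take, if_pos (by omega), hgetO]
          rw [hdec, List.getElem?_append_right (by rw [htklen]; omega)] at h1'
          have : PySem.Chars.isspace 'O' = true :=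
            hws _ (List.mem_of_getElem? h1')
          exact absurd this (by decide)
        -- find in A's first pass result is exactly n2
        have hfe : PySem.Chars.find (PySem.Chars.strip (d.toList.take n1)) ['N', 'O']
            = (n2 : Int) := by
          rw [he]
          apply pv_find_eq_of
          · rw [List.drop_take]
            refine List.prefix_iff_eq_take.mpr ?_
            have h2' : (['N', 'O'] : List Char).length = 2 := rfl
            rw [h2', List.take_take, min_eq_left (by omega), hdropN]
            rfl
          · intro j hj hcon
            have : (['N', 'O'] : List Char) <+: d.toList.drop j := by
              rw [List.drop_take] at hcon
              exact hcon.trans (List.take_prefix _ _)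
            exact hmin2 j hj this
        have hisin2e : PySem.Str.isIn "NO"
            (PySem.Str.strip (((PySem.Str.split? d "/").getD []).headD "")) = true := by
          rw [PySem.Str.isIn_eq, hNO, hstep1]
          show (PySem.Chars.find (PySem.Chars.strip (d.toList.take n1)) ['N', 'O'] != -1) = true
          rw [hfe]
          simp
        rw [hisin2e]
        simp only [if_true]
        have hord : PySem.Chars.find d.toList ['N', 'O'] < PySem.Chars.find d.toList ['/'] := by
          rw [hn1, hn2]
          exact_mod_cast (by omega : (n2 : Int) < (n1 : Int))
        rw [if_pos hord]
        apply String.toList_inj.mp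
        rw [pv_Astep_toList _ "NO" (by simp [hNO]) (by rw [hNO, hstep1, hfe]; omega)]
        rw [hNO, hstep1, hfe]
        rw [PySem.Str.toList_strip, PySem.Str.toList_slice, PySem.Chars.slice_eq_listSlice,
          PySem.List.slice_to _ hf2', hn2]
        simp only [Int.toNat_natCast]
        rw [he, List.take_take, min_eq_left (by omega)]

-- ===== VERDICT (by name: the statement is the Claim_ definition above) =====
set_option maxHeartbeats 2000000 in
theorem process_code_spec : Claim_equal_process_code := by
  intro data current_code _
  unfold Spec_process_code
  simp only [process_code, process_code_alt]
  rw [pv_guard]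
  by_cases hsw : PySem.Str.startswith (PySem.Str.strip data) current_code
  · simp only [hsw, if_true]
    have hss : PySem.Str.strip (PySem.Str.strip data) = PySem.Str.strip data := by
      apply String.toList_inj.mp
      rw [PySem.Str.toList_strip, PySem.Str.toList_strip, pv_strip_strip]
    rw [hss]
    set dstr := PySem.Str.strip (PySem.Str.replace (PySem.Str.strip data) current_code "") with hdstr
    have h := pv_core dstr (by rw [hdstr, PySem.Str.toList_strip]; exact pv_lstrip_strip _)
    rcases hmo : PySem.List.min? (((["/", "NO"] : List String).map
        (fun sym => PySem.Str.find dstr sym)).filter (fun p => p != -1)) (fun p => p) with _ | m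
    · rw [hmo] at h
      simpa using h
    · rw [hmo] at h
      simpa using h
  · simp only [hsw, Bool.false_eq_true, if_false]
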